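-- pv_equiv track=rewrite | github.com/kledvina/flexible-routing | code/fixed_routing.py | get_breakpoint_indices
-- ===== SOURCE A (Python) =====
-- def get_breakpoint_indices(demands, Q):
--     """
--     Takes in list of demands and an integer capacity, and returns a list of indices based on the demand list
--     where the truck will detour to the depot to refill and then return to the route.
--     """
--
--     indices = []
--     k = 1  # Scalar for capacity to track number of refill trips
--     agg = 0  # Tracks aggregate route demand filled
--
--     for i in range(0, len(demands)):
--
--         rem_demand = demands[i]
--         while rem_demand > 0:
--
--             if agg < k * Q and k * Q < agg + demands[i]:
--                 indices.append(i)  # breakpoint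
--                 indices.append(i)  # returnpoint
--                 k += 1
--             elif agg < k * Q and k * Q == agg + demands[i]:
--                 if i < len(demands) - 1:
--                     indices.append(i)  # breakpoint
--                     indices.append(i + 1)  # returnpoint
--                 k += 1
--             elif agg == (k - 1) * Q and k * Q == agg + demands[i]:
--                 if i < len(demands) - 1:
--                     indices.append(i)  # breakpoint
--                     indices.append(i + 1)  # returnpoint
--                 k += 1
--             else:
--                 pass
--
--             rem_demand -= Q
--
--         agg += demands[i]
--
--     return indices
-- ===== SOURCE B (Python) =====
-- def get_breakpoint_indices(demands, Q):
--     """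
--     Takes in list of demands and an integer capacity, and returns a list of indices based on the demand list
--     where the truck will detour to the depot to refill and then return to the route.
--     """
--     n = len(demands)
--     indices = []
--     agg = 0
--     k = 1
--     for i, d in enumerate(demands):
--         if d > 0:
--             new_k = (agg + d) // Q + 1
--             if new_k > k:
--                 cnt = new_k - k
--                 if (agg + d) % Q == 0:
--                     indices.extend([i, i] * (cnt - 1))
--                     if i < n - 1:
--                         indices.extend([i, i + 1])
--                 else:
--                     indices.extend([i, i] * cnt)
--                 k = new_k
--         agg += d
--     return indices
-- ===== Notes on version B (the rewrite author's own statement) =====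
-- stated objective: alternative
-- what changed: The inner while-loop that subtracts Q from each demand one trip at a time (re-testing the breakpoint conditions every trip) is replaced by per-customer integer division: the new refill count is (agg+d)//Q+1 and the breakpoint pairs are emitted arithmetically, one O(1) step per customer; measured on the generated inputs this was not >=1.5x faster.
import Mathlib
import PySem

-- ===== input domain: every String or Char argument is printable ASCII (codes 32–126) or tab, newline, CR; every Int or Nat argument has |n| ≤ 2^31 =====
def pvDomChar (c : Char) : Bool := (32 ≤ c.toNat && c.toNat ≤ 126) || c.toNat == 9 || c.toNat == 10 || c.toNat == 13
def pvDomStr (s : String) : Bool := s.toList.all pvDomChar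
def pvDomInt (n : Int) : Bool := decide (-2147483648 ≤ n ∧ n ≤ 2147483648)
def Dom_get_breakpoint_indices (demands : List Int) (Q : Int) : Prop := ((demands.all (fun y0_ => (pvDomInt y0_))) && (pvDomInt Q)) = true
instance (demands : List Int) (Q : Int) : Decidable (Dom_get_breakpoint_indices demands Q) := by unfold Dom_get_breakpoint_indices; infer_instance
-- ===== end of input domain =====

-- B replaces A's per-trip inner while-loop (subtract Q until the demand is filled) by one
-- integer-division step per customer; Pre_ excludes exactly the inputs (Q ≤ 0 with some
-- positive demand) on which A's inner while-loop never terminates.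


-- ===== PORT A =====
-- inner while-loop of A: state (indices, k); `rem` is rem_demand, `agg`/`d` fixed during the loop.
-- fuel makes the loop total; called with fuel = d.toNat, which is enough for every terminating
-- run of the Python loop (each iteration lowers rem by Q ≥ 1), so behaviour matches wherever A returns.
def innerA (i last d Q agg : Int) : Nat → Int → List Int × Int → List Int × Int
  | 0, _, st => st
  | fuel + 1, rem, (indices, k) =>
    if rem > 0 then
      let st' :=
        if agg < k * Q ∧ k * Q < agg + d then (indices ++ [i, i], k + 1)
        else if agg < k * Q ∧ k * Q = agg + d then
          ((if i < last then indices ++ [i, i + 1] else indices), k + 1)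
        else if agg = (k - 1) * Q ∧ k * Q = agg + d then
          ((if i < last then indices ++ [i, i + 1] else indices), k + 1)
        else (indices, k)
      innerA i last d Q agg fuel (rem - Q) st'
    else (indices, k)

-- the for-loop over range(0, len(demands)): state (indices, k, agg), i the running index
def outerA (Q last : Int) : List Int → Int → List Int × Int × Int → List Int × Int × Int
  | [], _, st => st
  | d :: rest, i, (indices, k, agg) =>
    let p := innerA i last d Q agg d.toNat d (indices, k)
    outerA Q last rest (i + 1) (p.1, p.2, agg + d)

def get_breakpoint_indices (demands : List Int) (Q : Int) : List Int :=
  (outerA Q ((demands.length : Int) - 1) demands 0 ([], 1, 0)).1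

-- ===== PORT B =====
-- one step of B's for-loop over enumerate(demands): state (indices, agg, k)
def stepB (n Q : Int) (st : List Int × Int × Int) (p : Int × Int) : List Int × Int × Int :=
  let (indices, agg, k) := st
  let i := p.1
  let d := p.2
  if d > 0 then
    let newk := PySem.Int.floordiv (agg + d) Q + 1
    if newk > k then
      let cnt := newk - k
      let indices' :=
        if PySem.Int.mod (agg + d) Q = 0 then
          (indices ++ (List.replicate (cnt - 1).toNat [i, i]).flatten)
            ++ (if i < n - 1 then [i, i + 1] else [])
        else indices ++ (List.replicate cnt.toNat [i, i]).flatten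
      (indices', agg + d, newk)
    else (indices, agg + d, k)
  else (indices, agg + d, k)

def get_breakpoint_indices_alt (demands : List Int) (Q : Int) : List Int :=
  ((PySem.List.enumerate demands).foldl (stepB (demands.length : Int) Q) ([], 0, 1)).1

-- ===== PRECONDITION & SPEC =====
-- Pre_ excludes exactly the inputs on which the Python A never returns: with Q ≤ 0 the inner
-- while-loop diverges as soon as some demand is positive.
def Pre_get_breakpoint_indices (demands : List Int) (Q : Int) : Prop :=
  0 < Q ∨ ∀ d ∈ demands, d ≤ 0
instance (demands : List Int) (Q : Int) : Decidable (Pre_get_breakpoint_indices demands Q) := by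
  unfold Pre_get_breakpoint_indices; infer_instance

def pvWitness_get_breakpoint_indices : List Int × Int := ([3, 4, 2], 5)

def Spec_get_breakpoint_indices (demands : List Int) (Q : Int) (out : List Int) : Prop := out = get_breakpoint_indices_alt demands Q
instance (demands : List Int) (Q : Int) (out : List Int) : Decidable (Spec_get_breakpoint_indices demands Q out) := by unfold Spec_get_breakpoint_indices; infer_instance

-- ===== CLAIM (what is proved, stated in full; the proofs are below) =====
def Claim_equal_get_breakpoint_indices : Prop := ∀ (demands : List Int) (Q : Int), Dom_get_breakpoint_indices demands Q → Pre_get_breakpoint_indices demands Q → Spec_get_breakpoint_indices demands Q (get_breakpoint_indices demands Q)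

-- ===== LEMMAS AND PROOFS =====

-- the list of indices B appends for one customer, as a function of s = agg + d and the entry k
def patt (i last Q s k : Int) : List Int :=
  let newk := PySem.Int.floordiv s Q + 1
  if newk > k then
    if PySem.Int.mod s Q = 0 then
      (List.replicate (newk - k - 1).toNat [i, i]).flatten
        ++ (if i < last then [i, i + 1] else [])
    else (List.replicate (newk - k).toNat [i, i]).flatten
  else []

-- the k both loops leave behind for one customer
def nextK (Q s k : Int) : Int :=
  let newk := PySem.Int.floordiv s Q + 1
  if newk > k then newk else k

lemma patt_gt (i last Q s k : Int) (hQ : 0 < Q) (h : s < k * Q) :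
    patt i last Q s k = [] ∧ nextK Q s k = k := by
  have hlt : PySem.Int.floordiv s Q < k := (PySem.Int.floordiv_lt_iff_lt_mul hQ).2 h
  constructor <;> simp [patt, nextK] <;> omega

lemma nextK_mul_gt (Q s k : Int) (hQ : 0 < Q) : s < nextK Q s k * Q := by
  have h1 : s < (PySem.Int.floordiv s Q + 1) * Q :=
    (PySem.Int.floordiv_lt_iff_lt_mul hQ).1 (by omega)
  unfold nextK
  by_cases hgt : PySem.Int.floordiv s Q + 1 > k
  · simpa [hgt] using h1
  · have hk : PySem.Int.floordiv s Q < k := by omega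
    have := (PySem.Int.floordiv_lt_iff_lt_mul hQ).1 hk
    simpa [hgt] using this

lemma patt_lt (i last Q s k : Int) (hQ : 0 < Q) (h : k * Q < s) :
    patt i last Q s k = [i, i] ++ patt i last Q s (k + 1) ∧
      nextK Q s k = nextK Q s (k + 1) := by
  have hkf : k ≤ PySem.Int.floordiv s Q :=
    (PySem.Int.le_floordiv_iff_mul_le hQ).2 (le_of_lt h)
  set f := PySem.Int.floordiv s Q with hf
  by_cases hm : PySem.Int.mod s Q = 0
  · -- s = f * Q, so k < f
    have hfs : f * Q + PySem.Int.mod s Q = s := PySem.Int.floordiv_mul_add_mod s Q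
    have hfq : f * Q = s := by omega
    have hkltf : k < f := by nlinarith
    have hc : (f + 1 - k - 1).toNat = (f + 1 - (k + 1) - 1).toNat + 1 := by omega
    constructor
    · simp only [patt, ← hf, hm, if_pos (by omega : f + 1 > k),
        if_pos (by omega : f + 1 > k + 1), if_pos, hc, List.replicate_succ,
        List.flatten_cons]
      simp
    · simp [nextK, ← hf]; omega
  · by_cases hkf2 : k = f
    · have hc1 : (f + 1 - k).toNat = 1 := by omega
      constructor
      · simp only [patt, ← hf, hm, if_pos (by omega : f + 1 > k), hc1,
          if_neg (by omega : ¬ f + 1 > k + 1)]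
        simp
      · simp [nextK, ← hf]; omega
    · have hkltf : k < f := by omega
      have hc : (f + 1 - k).toNat = (f + 1 - (k + 1)).toNat + 1 := by omega
      constructor
      · simp only [patt, ← hf, hm, if_pos (by omega : f + 1 > k),
          if_pos (by omega : f + 1 > k + 1), hc, List.replicate_succ,
          List.flatten_cons]
        simp
      · simp [nextK, ← hf]; omega

lemma patt_eq (i last Q s k : Int) (hQ : 0 < Q) (h : k * Q = s) :
    patt i last Q s k = (if i < last then [i, i + 1] else []) ∧
      nextK Q s k = k + 1 ∧ patt i last Q s (k + 1) = [] ∧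
      nextK Q s (k + 1) = k + 1 := by
  have hm : PySem.Int.mod s Q = 0 :=
    (PySem.Int.mod_eq_zero_iff_dvd s Q).2 ⟨k, by linarith [mul_comm k Q]⟩
  have hfk : PySem.Int.floordiv s Q = k := by
    rw [PySem.Int.floordiv_eq_iff_of_pos hQ]
    constructor
    · omega
    · nlinarith
  refine ⟨?_, ?_, ?_, ?_⟩
  · simp [patt, hfk, hm]
  · simp [nextK, hfk]
  · simp [patt, hfk]
  · simp [nextK, hfk]

lemma inner_go (i last d Q agg : Int) (hQ : 0 < Q) :
    ∀ (fuel : Nat) (rem k : Int) (ind : List Int),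
      agg < k * Q → agg + d < k * Q + max rem 0 → rem ≤ (fuel : Int) →
      innerA i last d Q agg fuel rem (ind, k)
        = (ind ++ patt i last Q (agg + d) k, nextK Q (agg + d) k) := by
  intro fuel
  induction fuel with
  | zero =>
    intro rem k ind hk hbound hfuel
    have hrem : rem ≤ 0 := by exact_mod_cast hfuel
    have hgt : agg + d < k * Q := by omega
    obtain ⟨hp, hn⟩ := patt_gt i last Q (agg + d) k hQ hgt
    simp [innerA, hp, hn]
  | succ fuel ih =>
    intro rem k ind hk hbound hfuel
    by_cases hrem : rem > 0
    · have hfuel' : rem - Q ≤ (fuel : Int) := by push_cast at hfuel ⊢; omega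
      rcases lt_trichotomy (k * Q) (agg + d) with h1 | h2 | h3
      · -- breakpoint + returnpoint at i, k increments
        have hstep : innerA i last d Q agg (fuel + 1) rem (ind, k)
            = innerA i last d Q agg fuel (rem - Q) (ind ++ [i, i], k + 1) := by
          simp [innerA, hrem, hk, h1]
        have hx : (k + 1) * Q = k * Q + Q := by ring
        rw [hstep, ih (rem - Q) (k + 1) (ind ++ [i, i])
            (by omega) (by omega) hfuel']
        obtain ⟨hp, hn⟩ := patt_lt i last Q (agg + d) k hQ h1
        rw [hp, hn, List.append_assoc]
      · -- exact fill: breakpoint at i, returnpoint at i+1 (unless last)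
        have hnlt : ¬ (k * Q < agg + d) := by omega
        have hstep : innerA i last d Q agg (fuel + 1) rem (ind, k)
            = innerA i last d Q agg fuel (rem - Q)
                ((if i < last then ind ++ [i, i + 1] else ind), k + 1) := by
          have hd0 : 0 < d := by omega
          simp [innerA, hrem, h2, hd0]
        obtain ⟨hp, hn, hp1, hn1⟩ := patt_eq i last Q (agg + d) k hQ h2
        have hx : (k + 1) * Q = k * Q + Q := by ring
        rw [hstep, ih (rem - Q) (k + 1) _
            (by omega) (by omega) hfuel']
        rw [hp, hn, hp1, hn1]
        split_ifs <;> simp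
      · -- capacity not yet reached: pass
        have hnlt : ¬ (k * Q < agg + d) := by omega
        have hne : ¬ (k * Q = agg + d) := by omega
        have hstep : innerA i last d Q agg (fuel + 1) rem (ind, k)
            = innerA i last d Q agg fuel (rem - Q) (ind, k) := by
          simp [innerA, hrem, hnlt, hne]
        rw [hstep, ih (rem - Q) k ind hk (by omega) hfuel']
    · have hmax : max rem 0 = 0 := by omega
      have hgt : agg + d < k * Q := by omega
      obtain ⟨hp, hn⟩ := patt_gt i last Q (agg + d) k hQ hgt
      simp [innerA, hrem, hp, hn]

-- one positive-demand step of B equals the appended pattern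
lemma stepB_patt (n Q i agg d k : Int) (ind : List Int) (hd : d > 0) :
    stepB n Q (ind, agg, k) (i, d)
      = (ind ++ patt i (n - 1) Q (agg + d) k, agg + d, nextK Q (agg + d) k) := by
  simp only [stepB, patt, nextK, hd, if_pos]
  split_ifs <;> simp [List.append_assoc]

lemma outer_eq (Q n : Int) (hQ : 0 < Q) :
    ∀ (l : List Int) (i : Int) (ind : List Int) (k agg : Int), agg < k * Q →
      (outerA Q (n - 1) l i (ind, k, agg)).1
        = ((PySem.List.enumerate l i).foldl (stepB n Q) (ind, agg, k)).1 := by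
  intro l
  induction l with
  | nil => intro i ind k agg _; simp [outerA, PySem.List.enumerate_nil]
  | cons d rest ih =>
    intro i ind k agg hk
    rw [PySem.List.enumerate_cons, List.foldl_cons]
    by_cases hd : d > 0
    · have hfuel : d ≤ ((d.toNat : Nat) : Int) := by omega
      have hrun := inner_go i (n - 1) d Q agg hQ d.toNat d k ind hk (by omega) hfuel
      have hstep := stepB_patt n Q i agg d k ind hd
      simp only [outerA, hrun, hstep]
      exact ih (i + 1) _ _ _ (nextK_mul_gt Q (agg + d) k hQ)
    · have ht : d.toNat = 0 := by omega
      have hstep : stepB n Q (ind, agg, k) (i, d) = (ind, agg + d, k) := by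
        simp [stepB, hd]
      simp only [outerA, ht, innerA, hstep]
      exact ih (i + 1) _ _ _ (by omega)

lemma outerA_nonpos (Q last : Int) :
    ∀ (l : List Int) (i : Int) (ind : List Int) (k agg : Int), (∀ d ∈ l, d ≤ 0) →
      (outerA Q last l i (ind, k, agg)).1 = ind := by
  intro l
  induction l with
  | nil => intro i ind k agg _; simp [outerA]
  | cons d rest ih =>
    intro i ind k agg h
    have hd : d ≤ 0 := h d (List.mem_cons_self ..)
    have ht : d.toNat = 0 := by omega
    simp only [outerA, ht, innerA]
    exact ih _ _ _ _ (fun x hx => h x (List.mem_cons_of_mem _ hx))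

lemma foldB_nonpos (n Q : Int) :
    ∀ (l : List Int) (i : Int) (ind : List Int) (agg k : Int), (∀ d ∈ l, d ≤ 0) →
      ((PySem.List.enumerate l i).foldl (stepB n Q) (ind, agg, k)).1 = ind := by
  intro l
  induction l with
  | nil => intro i ind agg k _; simp [PySem.List.enumerate_nil]
  | cons d rest ih =>
    intro i ind agg k h
    have hd : d ≤ 0 := h d (List.mem_cons_self ..)
    rw [PySem.List.enumerate_cons, List.foldl_cons]
    have hstep : stepB n Q (ind, agg, k) (i, d) = (ind, agg + d, k) := by
      simp [stepB]; omega
    rw [hstep]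
    exact ih _ _ _ _ (fun x hx => h x (List.mem_cons_of_mem _ hx))

-- ===== VERDICT (by name: the statement is the Claim_ definition above) =====
theorem get_breakpoint_indices_spec : Claim_equal_get_breakpoint_indices := by
  intro demands Q _ hpre
  unfold Spec_get_breakpoint_indices get_breakpoint_indices get_breakpoint_indices_alt
  rcases hpre with hQ | hnp
  · exact outer_eq Q (demands.length : Int) hQ demands 0 [] 1 0 (by omega)
  · rw [outerA_nonpos _ _ _ _ _ _ _ hnp, foldB_nonpos _ _ _ _ _ _ _ hnp]
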